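-- pv_equiv track=rewrite | github.com/durwasa-chakraborty/TensorCompressionProject | src/algorithms/huffman.py | huffman_coding
-- ===== SOURCE A (Python) =====
-- import heapq
--
-- class Node:
--     def __init__(self, char, freq):
--         self.char = char
--         self.freq = freq
--         self.left = None
--         self.right = None
--
--     def __lt__(self, other):
--         return self.freq < other.freq
--
-- def huffman_coding(tensor):
--     ''' Huffman Coding for compressing a tensor '''
--     # Calculate frequency of each value
--     frequency = {}
--     for value in tensor:
--         if value in frequency:
--             frequency[value] += 1
--         else:
--             frequency[value] = 1
--
--     # Create a priority queue from frequencies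
--     heap = [Node(char, freq) for char, freq in frequency.items()]
--     heapq.heapify(heap)
--
--     # Build the Huffman tree
--     while len(heap) > 1:
--         left = heapq.heappop(heap)
--         right = heapq.heappop(heap)
--
--         merged = Node(None, left.freq + right.freq)
--         merged.left = left
--         merged.right = right
--
--         heapq.heappush(heap, merged)
--
--     # Generate Huffman codes
--     root = heap[0]
--     codes = {}
--
--     def generate_codes(node, current_code=""):
--         if node is None:
--             return
--         if node.char is not None:
--             codes[node.char] = current_code
--             return
--         generate_codes(node.left, current_code + "0")
--         generate_codes(node.right, current_code + "1")
--
--     generate_codes(root)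
--     return codes
-- ===== SOURCE B (Python) =====
-- import heapq
--
-- class Node:
--     def __init__(self, char, freq):
--         self.char = char
--         self.freq = freq
--         self.left = None
--         self.right = None
--
--     def __lt__(self, other):
--         return self.freq < other.freq
--
-- def huffman_coding(tensor):
--     ''' Huffman Coding for compressing a tensor (list-based counting, for-loop
--         merge, stack code extraction) '''
--     # Distinct values in first-occurrence order, each counted with list.count
--     seen = []
--     for v in tensor:
--         if v not in seen:
--             seen.append(v)
--     heap = [Node(v, tensor.count(v)) for v in seen]
--     heapq.heapify(heap)
--
--     # Each merge shrinks the heap by exactly one, so exactly len(heap)-1 merges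
--     for _ in range(len(heap) - 1):
--         a = heapq.heappop(heap)
--         b = heapq.heappop(heap)
--         parent = Node(None, a.freq + b.freq)
--         parent.left = a
--         parent.right = b
--         heapq.heappush(heap, parent)
--
--     # Collect (value, code) pairs with an explicit stack, then build the dict once
--     pairs = []
--     stack = [(heap[0], "")]
--     while stack:
--         node, code = stack.pop()
--         if node.char is not None:
--             pairs.append((node.char, code))
--         else:
--             stack.append((node.right, code + "1"))
--             stack.append((node.left, code + "0"))
--     return dict(pairs)
-- ===== Notes on version B (the rewrite author's own statement) =====
-- stated objective: alternative
-- what changed: Frequencies come from a first-occurrence seen list plus list.count instead of a dict of running counts, the heapq merge runs as a counted for-loop over range(len(heap)-1) instead of a while len>1 loop, and codes are extracted with an explicit stack into a pair list turned into a dict once, instead of recursive dict insertion; the heapq push/pop/heapify calls are kept so ties break identically.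
-- outside the precondition, e.g. on huffman_coding([]): A raises IndexError, B raises IndexError
import Mathlib
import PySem

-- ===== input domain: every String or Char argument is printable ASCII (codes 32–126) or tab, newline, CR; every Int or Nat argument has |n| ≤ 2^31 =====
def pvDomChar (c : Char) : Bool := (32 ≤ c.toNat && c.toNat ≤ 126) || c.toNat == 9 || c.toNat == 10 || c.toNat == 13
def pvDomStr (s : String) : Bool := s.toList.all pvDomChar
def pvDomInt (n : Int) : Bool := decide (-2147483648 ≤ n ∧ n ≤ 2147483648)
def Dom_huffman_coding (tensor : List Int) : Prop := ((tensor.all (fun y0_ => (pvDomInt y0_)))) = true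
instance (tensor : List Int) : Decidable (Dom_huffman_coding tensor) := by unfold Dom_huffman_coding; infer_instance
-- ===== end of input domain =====

-- B counts frequencies with a seen-list plus list.count instead of a dict, runs the heapq
-- merge as a counted for-loop instead of a while-loop, and extracts codes with an explicit
-- stack into a pair list instead of recursive dict insertion (objective: alternative decomposition).

-- ===== PORT A =====
-- The Python Node objects: leaves carry a tensor value (char) and a frequency; merged nodes carry
-- char=None and two children.  __lt__ compares freq only (exactly what heapq uses).
inductive HT where
  | leaf : Int → Int → HT          -- char, freq
  | node : Int → HT → HT → HT      -- freq, left, right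
deriving DecidableEq, Repr

def HT.freq : HT → Int
  | .leaf _ f => f
  | .node f _ _ => f

def HT.size : HT → Nat
  | .leaf _ _ => 1
  | .node _ l r => 1 + l.size + r.size

def HTdflt : HT := .leaf 0 0

-- CPython heapq._siftdown(heap, startpos, pos) with newitem = heap[pos] passed explicitly
-- (position pos is only written, never read, inside the loop — exact for in-range indices,
-- which heapq always uses; getD's default is never hit on the real call sites).
def siftdownGo (h : List HT) (startpos pos : Nat) (newitem : HT) : List HT :=
  if _h : startpos < pos then
    let parentpos := (pos - 1) / 2
    let parent := h.getD parentpos HTdflt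
    if newitem.freq < parent.freq then
      siftdownGo (h.set pos parent) startpos parentpos newitem
    else h.set pos newitem
  else h.set pos newitem
termination_by pos
decreasing_by omega

-- CPython heapq._siftup bubble-down loop; returns the heap and the final pos.
def siftupGo (h : List HT) (endpos pos : Nat) : List HT × Nat :=
  if _h : 2 * pos + 1 < endpos then
    let c := if 2 * pos + 2 < endpos ∧
                ¬ ((h.getD (2 * pos + 1) HTdflt).freq < (h.getD (2 * pos + 2) HTdflt).freq)
             then 2 * pos + 2 else 2 * pos + 1
    siftupGo (h.set pos (h.getD c HTdflt)) endpos c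
  else (h, pos)
termination_by endpos - pos
decreasing_by split <;> omega

-- CPython heapq._siftup(heap, pos)
def siftup (h : List HT) (pos : Nat) : List HT :=
  let newitem := h.getD pos HTdflt
  let hp := siftupGo h h.length pos
  siftdownGo hp.1 pos hp.2 newitem

-- heapq.heapify: for i in reversed(range(n // 2)): _siftup(heap, i)
def pyHeapify (h : List HT) : List HT :=
  (List.range (h.length / 2)).reverse.foldl siftup h

-- heapq.heappush: append, then _siftdown(heap, 0, len(heap) - 1)
def heappush (h : List HT) (item : HT) : List HT :=
  siftdownGo (h ++ [item]) 0 h.length item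

-- heapq.heappop (none = IndexError on the empty heap; never hit under A's len > 1 guard)
def heappop (h : List HT) : Option (HT × List HT) :=
  match h.getLast? with
  | none => none
  | some lastelt =>
    let body := h.dropLast
    if body.isEmpty then some (lastelt, [])
    else some (body.getD 0 HTdflt, siftup (body.set 0 lastelt) 0)

-- A's 'while len(heap) > 1' merge loop; fuel = initial heap length bounds the iterations
def buildTree : Nat → List HT → List HT
  | 0, h => h
  | fuel + 1, h =>
    if h.length > 1 then
      match heappop h with
      | none => h
      | some (l, h1) =>
        match heappop h1 with
        | none => h1
        | some (r, h2) => buildTree fuel (heappush h2 (.node (l.freq + r.freq) l r))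
    else h

-- A's frequency loop: 'if value in frequency: frequency[value] += 1 else: frequency[value] = 1'
-- (the read inside the += branch is ported as getD; the key is present there, so the default 0 is never used)
def countA (tensor : List Int) : PySem.Dict Int Int :=
  tensor.foldl
    (fun d v => if d.contains v then d.insert v (d.getD v 0 + 1) else d.insert v 1)
    PySem.Dict.empty

-- A's recursive generate_codes (children are never None in the tree built above, so the
-- 'if node is None: return' guard is vacuous and the leaf/internal cases remain)
def genA (t : HT) (code : String) (codes : PySem.Dict Int String) : PySem.Dict Int String :=
  match t with
  | .leaf c _ => codes.insert c code
  | .node _ l r => genA r (code ++ "1") (genA l (code ++ "0") codes)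

def huffman_coding (tensor : List Int) : List (Int × String) :=
  let frequency := countA tensor
  let heap := pyHeapify (frequency.items.map (fun p => HT.leaf p.1 p.2))
  let final := buildTree heap.length heap
  match PySem.List.pyGet? final (0 : Int) with   -- heap[0]: IndexError (none) iff tensor = []
  | none => []
  | some root => (genA root "" PySem.Dict.empty).items

-- ===== PORT B =====
-- B's seen loop: 'if v not in seen: seen.append(v)' — exactly PySem.Set.add
def seenB (tensor : List Int) : List Int :=
  tensor.foldl (fun s v => PySem.Set.add s v) []

-- '[Node(v, tensor.count(v)) for v in seen]' then heapq.heapify (library call, same port)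
def heapB (tensor : List Int) : List HT :=
  pyHeapify ((seenB tensor).map (fun v => HT.leaf v ((tensor.count v : Int))))

-- one body of B's for-loop: pop, pop, push the merged node (heappop never fails inside the loop)
def mergeStep (h : List HT) : List HT :=
  match heappop h with
  | none => h
  | some (l, h1) =>
    match heappop h1 with
    | none => h1
    | some (r, h2) => heappush h2 (.node (l.freq + r.freq) l r)

-- B's 'for _ in range(len(heap) - 1)'
def buildB (h : List HT) : List HT :=
  (List.range (h.length - 1)).foldl (fun acc _ => mergeStep acc) h

-- B's stack loop: pop (node, code); append a leaf pair; else push right '1' then left '0'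
def collectB : List (HT × String) → List (Int × String) → List (Int × String)
  | [], pairs => pairs
  | (.leaf c _, p) :: rest, pairs => collectB rest (pairs ++ [(c, p)])
  | (.node _ l r, p) :: rest, pairs => collectB ((l, p ++ "0") :: (r, p ++ "1") :: rest) pairs
termination_by st _ => (st.map (fun q => q.1.size)).sum
decreasing_by
  all_goals simp only [List.map_cons, List.sum_cons, HT.size]
  all_goals omega

def huffman_coding_alt (tensor : List Int) : List (Int × String) :=
  let final := buildB (heapB tensor)
  match PySem.List.pyGet? final (0 : Int) with   -- heap[0]: IndexError (none) iff tensor = []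
  | none => []
  | some root =>
    -- 'dict(pairs)': the pairs inserted once, left to right
    ((collectB [(root, "")] []).foldl (fun d q => d.insert q.1 q.2) PySem.Dict.empty).items

-- ===== PRECONDITION & SPEC =====
-- Pre_ excludes only the empty tensor, on which the Python A raises IndexError at heap[0].
def Pre_huffman_coding (tensor : List Int) : Prop := tensor ≠ []
instance (tensor : List Int) : Decidable (Pre_huffman_coding tensor) := by
  unfold Pre_huffman_coding; infer_instance

def pvWitness_huffman_coding : List Int := [1, 2, 2, 3]

def Spec_huffman_coding (tensor : List Int) (out : List (Int × String)) : Prop := out = huffman_coding_alt tensor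
instance (tensor : List Int) (out : List (Int × String)) : Decidable (Spec_huffman_coding tensor out) := by unfold Spec_huffman_coding; infer_instance

-- ===== CLAIM (what is proved, stated in full; the proofs are below) =====
def Claim_equal_huffman_coding : Prop := ∀ (tensor : List Int), Dom_huffman_coding tensor → Pre_huffman_coding tensor → Spec_huffman_coding tensor (huffman_coding tensor)

-- ===== LEMMAS AND PROOFS =====

-- (1) the two starting heaps are the same list of leaves
theorem countA_eq_counter (tensor : List Int) : countA tensor = PySem.Dict.counter tensor := by
  rw [← PySem.Dict.foldl_insert_getD_add_one_eq_counter]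
  unfold countA
  congr 1
  funext d v
  by_cases h : d.contains v
  · simp [h]
  · have h' : d.contains v = false := by simpa using h
    rw [if_neg (by simp [h']), PySem.Dict.getD_of_not_contains d (k := v) 0 h']
    norm_num

theorem heapA_eq_heapB (tensor : List Int) :
    pyHeapify ((countA tensor).items.map (fun p => HT.leaf p.1 p.2)) = heapB tensor := by
  unfold heapB seenB
  rw [countA_eq_counter, PySem.Dict.items_counter, ← PySem.Set.ofList_eq_foldl, List.map_map]
  rfl

-- (2) lengths: every heap primitive is length-preserving (List.set) except push (+1) / pop (−1)
theorem length_siftdownGo (h : List HT) (s p : Nat) (x : HT) :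
    (siftdownGo h s p x).length = h.length := by
  fun_induction siftdownGo h s p x <;> simp_all

theorem length_siftupGo (h : List HT) (e p : Nat) :
    (siftupGo h e p).1.length = h.length := by
  fun_induction siftupGo h e p <;> simp_all

theorem length_siftup (h : List HT) (p : Nat) : (siftup h p).length = h.length := by
  unfold siftup
  rw [length_siftdownGo, length_siftupGo]

theorem length_heappush (h : List HT) (x : HT) : (heappush h x).length = h.length + 1 := by
  unfold heappush
  rw [length_siftdownGo]
  simp

theorem heappop_of_length_pos (h : List HT) (hp : 0 < h.length) :
    ∃ x h', heappop h = some (x, h') ∧ h'.length + 1 = h.length := by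
  match hl : h.getLast? with
  | none => rw [List.getLast?_eq_none_iff] at hl; simp [hl] at hp
  | some lastelt =>
    by_cases hb : h.dropLast.isEmpty
    · have e : heappop h = some (lastelt, []) := by
        unfold heappop; rw [hl]; simp [hb]
      refine ⟨lastelt, [], e, ?_⟩
      have h0 : h.dropLast = [] := by simpa using hb
      have hd : h.dropLast.length + 1 = h.length := by rw [List.length_dropLast]; omega
      rw [← hd, h0]
    · have e : heappop h = some (h.dropLast.getD 0 HTdflt, siftup (h.dropLast.set 0 lastelt) 0) := by
        unfold heappop; rw [hl]; simp [hb]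
      refine ⟨_, _, e, ?_⟩
      rw [length_siftup, List.length_set, List.length_dropLast]
      omega

theorem length_mergeStep (h : List HT) (hp : 1 < h.length) :
    (mergeStep h).length + 1 = h.length := by
  obtain ⟨l, h1, e1, hl1⟩ := heappop_of_length_pos h (by omega)
  obtain ⟨r, h2, e2, hl2⟩ := heappop_of_length_pos h1 (by omega)
  simp only [mergeStep, e1, e2, length_heappush]
  omega

-- A's fueled while-loop equals iterating mergeStep exactly (length − 1) times
theorem buildTree_eq_iterate (fuel : Nat) (h : List HT) (hf : h.length ≤ fuel + 1) :
    buildTree fuel h = mergeStep^[h.length - 1] h := by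
  induction fuel generalizing h with
  | zero =>
    have h0 : h.length - 1 = 0 := by omega
    simp [buildTree, h0]
  | succ fuel ih =>
    by_cases hl : 1 < h.length
    · obtain ⟨l, h1, e1, hl1⟩ := heappop_of_length_pos h (by omega)
      obtain ⟨r, h2, e2, hl2⟩ := heappop_of_length_pos h1 (by omega)
      have hms : mergeStep h = heappush h2 (.node (l.freq + r.freq) l r) := by
        simp only [mergeStep, e1, e2]
      have hlen : (mergeStep h).length + 1 = h.length := length_mergeStep h hl
      have : buildTree (fuel + 1) h = buildTree fuel (mergeStep h) := by
        simp only [buildTree, if_pos hl, e1, e2]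
        rw [hms]
      rw [this, ih (mergeStep h) (by omega)]
      have h1n : h.length - 1 = ((mergeStep h).length - 1) + 1 := by omega
      rw [h1n, Function.iterate_succ_apply]
    · unfold buildTree
      rw [if_neg hl]
      have : h.length - 1 = 0 := by omega
      simp [this]

theorem foldl_range_const {A : Type} (f : A → A) (n : Nat) (a : A) :
    (List.range n).foldl (fun acc _ => f acc) a = f^[n] a := by
  induction n generalizing a with
  | zero => rfl
  | succ n ih =>
    rw [List.range_succ, List.foldl_append, ih, Function.iterate_succ_apply']
    rfl

theorem buildB_eq_iterate (h : List HT) : buildB h = mergeStep^[h.length - 1] h := by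
  unfold buildB
  exact foldl_range_const mergeStep (h.length - 1) h

-- (3) code extraction: the leaf pairs of a tree, left to right
def leavesOf : HT → String → List (Int × String)
  | .leaf c _, p => [(c, p)]
  | .node _ l r, p => leavesOf l (p ++ "0") ++ leavesOf r (p ++ "1")

theorem genA_eq_foldl (t : HT) (p : String) (d : PySem.Dict Int String) :
    genA t p d = (leavesOf t p).foldl (fun d q => d.insert q.1 q.2) d := by
  induction t generalizing p d with
  | leaf c f => rfl
  | node f l r ihl ihr => simp [genA, leavesOf, List.foldl_append, ihl, ihr]

theorem collectB_cons (t : HT) (p : String) (rest : List (HT × String))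
    (pairs : List (Int × String)) :
    collectB ((t, p) :: rest) pairs = collectB rest (pairs ++ leavesOf t p) := by
  induction t generalizing p rest pairs with
  | leaf c f => rw [collectB.eq_def]; rfl
  | node f l r ihl ihr =>
    rw [collectB.eq_def]
    simp only []
    rw [ihl, ihr, leavesOf, List.append_assoc]

theorem collectB_nil (pairs : List (Int × String)) : collectB [] pairs = pairs := by
  rw [collectB.eq_def]

-- ===== VERDICT (by name: the statement is the Claim_ definition above) =====
theorem huffman_coding_spec : Claim_equal_huffman_coding := by
  intro tensor _ _
  unfold Spec_huffman_coding
  simp only [huffman_coding, huffman_coding_alt]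
  rw [heapA_eq_heapB,
      buildTree_eq_iterate (heapB tensor).length (heapB tensor) (by omega),
      ← buildB_eq_iterate]
  cases PySem.List.pyGet? (buildB (heapB tensor)) (0 : Int) with
  | none => rfl
  | some root =>
    simp only [genA_eq_foldl, collectB_cons, collectB_nil, List.nil_append]
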